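-- pv_equiv track=rewrite | github.com/laushkin1/STU_Study | prog2024/project/player.py | move_player
-- ===== SOURCE A (Python) =====
-- def move_player(player: list, moves: int, our_map: [list]) -> bool:
--     # func changes player list and return True if list has been changed
--     # and false if move is not allow
--
--     len_map = len(our_map)
--     x = player[0]
--     y = player[1]
--
--     if x % 2: direction = -1
--     else: direction = 1
--
--     counter = 0
--     for _ in range(moves):
--         counter += 1
--         y += direction
--
--         if y >= len_map:
--             y = len_map - 1
--             x += 1
--             direction = -1
--         elif y < 0:
--             y = 0
--             x += 1
--             direction = 1
--
--         if x >= len_map: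
--             x = len_map - 1
--             counter -= 1
--             break
--
--     if counter == moves:
--         player[0] = x
--         player[1] = y
--         return True
--
--     return False
-- ===== SOURCE B (Python) =====
-- def _row_steps(n, y, d):
--     """Steps the serpentine walk still spends in its current row."""
--     return (n - y) if d == 1 else (y + 1)
--
-- def move_player(player: list, moves: int, our_map: [list]) -> bool:
--     # Closed form instead of per-step simulation: take the first move
--     # explicitly (it may bounce off a row end into the next row), after which
--     # the walk is a pure serpentine -- finishing the current row and then
--     # exactly one row per len(our_map) steps.  Mutates player on success only.
--     n = len(our_map)
--     if moves < 0:
--         return False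
--     if moves == 0:
--         return True
--
--     x, y = player[0], player[1]
--     d = -1 if x % 2 else 1
--
--     # first move, bouncing at the row ends into the next row
--     y += d
--     if y >= n:
--         x, y, d = x + 1, n - 1, -1
--     elif y < 0:
--         x, y, d = x + 1, 0, 1
--
--     if x >= n:
--         return False
--
--     s = moves - 1
--     if s >= _row_steps(n, y, d) + (n - 1 - x) * n:
--         return False
--
--     # final cell
--     row_rest = _row_steps(n, y, d) - 1
--     if s <= row_rest:
--         x_f, y_f = x, y + d * s
--     else:
--         w, r = divmod(s - row_rest - 1, n)
--         w += 1
--         x_f = x + w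
--         from_top = (d == 1) if w % 2 == 1 else (d == -1)
--         y_f = (n - 1 - r) if from_top else r
--     player[0], player[1] = x_f, y_f
--     return True
-- ===== Notes on version B (the rewrite author's own statement) =====
-- stated objective: alternative
-- what changed: A simulates the serpentine walk one step at a time for `moves` iterations; B takes only the first (possibly bouncing) step and then decides success and the final cell by closed-form arithmetic (finish the current row, then one row per len(map) steps). Pre_ excludes the empty map, on which A's walk wraps on a zero-width row and its result is an artefact of the wrap arithmetic, and players with fewer than 2 coordinates, on which A raises IndexError.
-- outside the precondition, e.g. on move_player([-5, 0], 2, []): A returns True, B returns False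
import Mathlib
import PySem

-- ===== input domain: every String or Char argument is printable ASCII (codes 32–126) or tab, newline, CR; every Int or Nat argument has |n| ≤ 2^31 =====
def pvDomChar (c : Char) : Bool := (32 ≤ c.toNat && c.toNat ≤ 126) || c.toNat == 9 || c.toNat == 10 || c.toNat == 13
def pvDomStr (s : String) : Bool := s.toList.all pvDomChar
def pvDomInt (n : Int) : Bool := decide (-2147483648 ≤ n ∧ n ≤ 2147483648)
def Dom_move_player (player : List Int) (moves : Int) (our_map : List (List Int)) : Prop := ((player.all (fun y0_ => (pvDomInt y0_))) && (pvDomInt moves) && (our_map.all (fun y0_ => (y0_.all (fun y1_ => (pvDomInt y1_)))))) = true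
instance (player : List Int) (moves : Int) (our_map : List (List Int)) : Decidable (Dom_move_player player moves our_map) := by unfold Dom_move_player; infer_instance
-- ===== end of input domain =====

-- B replaces A's per-step simulation by one explicit first step plus closed-form
-- serpentine arithmetic (objective: alternative).
-- Both Pythons mutate `player` (identically on success, as tested); the
-- equivalence proved here is about the RETURN value.

-- ===== PORT A =====
-- A's `for _ in range(moves)` loop, step for step: counter += 1; y += direction;
-- the two boundary branches; then the `x >= len_map` break (counter -= 1).
-- State: (counter, x, y, direction); fuel = number of remaining range elements.
def moveLoop (n : Int) : Nat → Int → Int → Int → Int → Int × Int × Int × Int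
  | 0, c, x, y, d => (c, x, y, d)
  | f+1, c, x, y, d =>
    if y + d ≥ n then
      (if x + 1 ≥ n then (c + 1 - 1, n - 1, n - 1, -1) else moveLoop n f (c + 1) (x + 1) (n - 1) (-1))
    else if y + d < 0 then
      (if x + 1 ≥ n then (c + 1 - 1, n - 1, 0, 1) else moveLoop n f (c + 1) (x + 1) 0 1)
    else
      (if x ≥ n then (c + 1 - 1, n - 1, y + d, d) else moveLoop n f (c + 1) x (y + d) d)

def move_player (player : List Int) (moves : Int) (our_map : List (List Int)) : Bool :=
  let n : Int := our_map.length
  match PySem.List.pyGet? player 0, PySem.List.pyGet? player 1 with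
  | some x, some y =>
    let d : Int := if PySem.Int.mod x 2 ≠ 0 then -1 else 1
    decide ((moveLoop n moves.toNat 0 x y d).1 = moves)
  | _, _ => false  -- player[0]/player[1] raises IndexError; excluded by Pre_

-- ===== PORT B =====
-- Transliteration of Source B's return path (the final-cell computation of Source B is
-- a side effect on the argument `player` and has no Lean counterpart).
-- Source B's helper _row_steps:
def rowSteps (n y d : Int) : Int := if d = 1 then n - y else y + 1

-- the tail of Source B after the bouncing first move: the `x >= n` check and the
-- closed-form capacity test
def serpRest (n moves x y d : Int) : Bool :=
  if x ≥ n then false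
  else decide (¬ (moves - 1 ≥ rowSteps n y d + (n - 1 - x) * n))

def move_player_alt (player : List Int) (moves : Int) (our_map : List (List Int)) : Bool :=
  let n : Int := our_map.length
  if moves < 0 then false
  else if moves = 0 then true
  else
    match PySem.List.pyGet? player 0 with
    | none => false  -- player[0] raises IndexError; excluded by Pre_
    | some x =>
      match PySem.List.pyGet? player 1 with
      | none => false  -- player[1] raises IndexError; excluded by Pre_
      | some y =>
        let d : Int := if PySem.Int.mod x 2 ≠ 0 then -1 else 1
        -- first move, bouncing at the row ends into the next row
        if y + d ≥ n then serpRest n moves (x + 1) (n - 1) (-1)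
        else if y + d < 0 then serpRest n moves (x + 1) 0 1
        else serpRest n moves x (y + d) d

-- ===== PRECONDITION & SPEC =====
-- Pre_ excludes: players with fewer than 2 coordinates, where A raises
-- IndexError; and the empty map, on which A's walk wraps on a zero-width row
-- and its result (True iff x + moves < 0) is an artefact of the wrap
-- arithmetic, while B's serpentine arithmetic has no rows to walk.
def Pre_move_player (player : List Int) (moves : Int) (our_map : List (List Int)) : Prop :=
  2 ≤ player.length ∧ our_map ≠ []

instance (player : List Int) (moves : Int) (our_map : List (List Int)) : Decidable (Pre_move_player player moves our_map) := by unfold Pre_move_player; infer_instance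

def pvWitness_move_player : List Int × Int × List (List Int) := ([0, 0], 3, [[0], [0]])

def Spec_move_player (player : List Int) (moves : Int) (our_map : List (List Int)) (out : Bool) : Prop := out = move_player_alt player moves our_map
instance (player : List Int) (moves : Int) (our_map : List (List Int)) (out : Bool) : Decidable (Spec_move_player player moves our_map out) := by unfold Spec_move_player; infer_instance

-- ===== CLAIM (what is proved, stated in full; the proofs are below) =====
def Claim_equal_move_player : Prop := ∀ (player : List Int) (moves : Int) (our_map : List (List Int)), Dom_move_player player moves our_map → Pre_move_player player moves our_map → Spec_move_player player moves our_map (move_player player moves our_map)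


-- ===== LEMMAS AND PROOFS =====

-- Number of the loop iteration at which A's `break` fires (≥ 1), as a closed
-- form of the state (x, y, d); the loop survives `f` iterations iff f < Tfun.
def Tfun (n x y d : Int) : Int :=
  if n ≤ 0 then max 1 (-x)
  else if x ≥ n then 1
  else (if d = 1 then (if y + 1 ≥ n then 1 else if y + 1 < 0 then 1 else n - y)
        else (if y - 1 < 0 then 1 else if y - 1 ≥ n then 1 else y + 1)) + (n - 1 - x) * n

theorem Tfun_pos (n x y d : Int) : 1 ≤ Tfun n x y d := by
  unfold Tfun
  split_ifs <;>
    first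
    | omega
    | (have hprod : 0 ≤ (n - 1 - x) * n := mul_nonneg (by omega) (by omega); omega)

-- Loop invariant: the final counter is the initial counter plus
-- min fuel (Tfun - 1)  (all `fuel` iterations complete, or the break fires at
-- iteration Tfun with counter decremented once).
theorem moveLoop_counter (n : Int) (hn : 0 ≤ n) :
    ∀ (f : Nat) (c x y d : Int), d = 1 ∨ d = -1 →
      (moveLoop n f c x y d).1 = c + min (f : Int) (Tfun n x y d - 1) := by
  intro f
  induction f with
  | zero =>
    intro c x y d _
    have := Tfun_pos n x y d
    simp only [moveLoop, Nat.cast_zero]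
    omega
  | succ f ih =>
    intro c x y d hd
    have e1 : (n - 1 - x) * n = (n - 1 - (x + 1)) * n + n := by ring
    rcases hd with rfl | rfl
    · -- d = 1
      simp only [moveLoop]
      split_ifs with h1 h2 h3 h4
      · simp only [Tfun]
        split_ifs <;>
          first
          | omega
          | contradiction
          | (exact absurd trivial (by assumption))
          | (have hx : n - 1 - x = 0 := (by omega)
             rw [hx, zero_mul]; omega)
      · rw [ih (c + 1) (x + 1) (n - 1) (-1) (Or.inr rfl)]
        simp only [Tfun]
        split_ifs <;>
          first
          | omega
          | contradiction
          | (exact absurd trivial (by assumption))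
      · simp only [Tfun]
        split_ifs <;>
          first
          | omega
          | contradiction
          | (exact absurd trivial (by assumption))
          | (have hx : n - 1 - x = 0 := (by omega)
             rw [hx, zero_mul]; omega)
      · rw [ih (c + 1) (x + 1) 0 1 (Or.inl rfl)]
        simp only [Tfun]
        split_ifs <;>
          first
          | omega
          | contradiction
          | (exact absurd trivial (by assumption))
      · simp only [Tfun]
        split_ifs <;>
          first
          | omega
          | contradiction
          | (exact absurd trivial (by assumption))
          | (have hx : n - 1 - x = 0 := (by omega)
             rw [hx, zero_mul]; omega)
      · rw [ih (c + 1) x (y + 1) 1 (Or.inl rfl)]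
        simp only [Tfun]
        split_ifs <;>
          first
          | omega
          | contradiction
          | (exact absurd trivial (by assumption))
    · -- d = -1
      simp only [moveLoop]
      split_ifs with h1 h2 h3 h4
      · simp only [Tfun]
        split_ifs <;>
          first
          | omega
          | contradiction
          | (exact absurd trivial (by assumption))
          | (have hx : n - 1 - x = 0 := (by omega)
             rw [hx, zero_mul]; omega)
      · rw [ih (c + 1) (x + 1) (n - 1) (-1) (Or.inr rfl)]
        simp only [Tfun]
        split_ifs <;>
          first
          | omega
          | contradiction
          | (exact absurd trivial (by assumption))
      · simp only [Tfun]
        split_ifs <;>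
          first
          | omega
          | contradiction
          | (exact absurd trivial (by assumption))
          | (have hx : n - 1 - x = 0 := (by omega)
             rw [hx, zero_mul]; omega)
      · rw [ih (c + 1) (x + 1) 0 1 (Or.inl rfl)]
        simp only [Tfun]
        split_ifs <;>
          first
          | omega
          | contradiction
          | (exact absurd trivial (by assumption))
      · simp only [Tfun]
        split_ifs <;>
          first
          | omega
          | contradiction
          | (exact absurd trivial (by assumption))
          | (have hx : n - 1 - x = 0 := (by omega)
             rw [hx, zero_mul]; omega)
      · rw [ih (c + 1) x (y + -1) (-1) (Or.inr rfl)]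
        simp only [Tfun]
        split_ifs <;>
          first
          | omega
          | contradiction
          | (exact absurd trivial (by assumption))

-- pyGet? on the first two elements of a list of length ≥ 2.
theorem pyGet?_two {l : List Int} (h : 2 ≤ l.length) :
    ∃ a b t, l = a :: b :: t := by
  match l, h with
  | a :: b :: t, _ => exact ⟨a, b, t, rfl⟩

-- The B-side condition (bounce + serpRest) agrees with A's break-time Tfun.
theorem cond_eq (n moves x y D : Int) (hn : 1 ≤ n) (hd : D = 1 ∨ D = -1) (hm : 1 ≤ moves) :
    decide (0 + min ((moves.toNat : Int)) (Tfun n x y D - 1) = moves)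
      = (if y + D ≥ n then serpRest n moves (x + 1) (n - 1) (-1)
         else if y + D < 0 then serpRest n moves (x + 1) 0 1
         else serpRest n moves x (y + D) D) := by
  have e1 : (n - 1 - x) * n = (n - 1 - (x + 1)) * n + n := by ring
  unfold serpRest rowSteps Tfun
  rcases hd with rfl | rfl <;>
    (split_ifs <;>
      simp only [decide_eq_false_iff_not, decide_eq_true_eq, decide_eq_decide] <;>
      first
        | exact False.elim (by assumption)
        | omega
        | (have h0 : (n - 1 - x) * n = 0 := by
             have hx0 : n - 1 - x = 0 := by omega
             rw [hx0, zero_mul]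
           omega))

-- ===== VERDICT (by name: the statement is the Claim_ definition above) =====
theorem move_player_spec : Claim_equal_move_player := by
  intro player moves our_map _ hpre
  obtain ⟨hlen, hmap⟩ := hpre
  obtain ⟨x, y, t, rfl⟩ := pyGet?_two hlen
  unfold Spec_move_player move_player move_player_alt
  have h1 : PySem.List.pyGet? (x :: y :: t) 1 = some y := by
    have := PySem.List.pyGet?_cons_succ (x := x) (xs := y :: t) (n := 0)
    simpa using this
  simp only [PySem.List.pyGet?_zero_cons, h1]
  generalize hN : (our_map.length : Int) = n
  have hn1 : 1 ≤ n := by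
    have : our_map.length ≠ 0 := by simpa using hmap
    omega
  generalize hD : (if PySem.Int.mod x 2 ≠ 0 then (-1 : Int) else 1) = D
  have hd' : D = 1 ∨ D = -1 := by rw [← hD]; split_ifs <;> simp
  rw [moveLoop_counter n (by omega) moves.toNat 0 x y D hd']
  have Tpos := Tfun_pos n x y D
  by_cases hneg : moves < 0
  · rw [if_pos hneg]
    simp only [decide_eq_false_iff_not]
    omega
  · by_cases hz : moves = 0
    · subst hz
      simp only [if_neg hneg, if_true, decide_eq_true_eq]
      omega
    · rw [if_neg hneg, if_neg hz]
      exact cond_eq n moves x y D hn1 hd' (by omega)
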